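-- pv_equiv track=rewrite | github.com/nermadie/CodeForces_Solutions | CodeforcesRound991Div3/prob04.py | solve
-- ===== SOURCE A (Python) =====
-- def solve(n):
--     i = 1
--     while i < len(n):
--         if i > 0 and n[i] > n[i - 1] + 1:
--             n[i], n[i - 1], i = n[i - 1], n[i] - 1, i - 1
--         else:
--             i += 1
--     return "".join(map(str, n))
-- ===== SOURCE B (Python) =====
-- def solve(n):
--     res = []
--     for d in n:
--         cur = d
--         popped = []
--         while res and cur > res[-1] + 1:
--             popped.append(res.pop())
--             cur -= 1
--         res.append(cur)
--         res.extend(reversed(popped))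
--     n[:] = res
--     return "".join(map(str, n))
-- ===== Notes on version B (the rewrite author's own statement) =====
-- stated objective: alternative
-- what changed: Replaces the in-place back-and-forth index walk (swap, step left, re-sweep right) with a single forward pass over the digits maintaining an explicit stack: each pop+decrement models one leftward swap and the popped digits are pushed back in reverse order.
import Mathlib
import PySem

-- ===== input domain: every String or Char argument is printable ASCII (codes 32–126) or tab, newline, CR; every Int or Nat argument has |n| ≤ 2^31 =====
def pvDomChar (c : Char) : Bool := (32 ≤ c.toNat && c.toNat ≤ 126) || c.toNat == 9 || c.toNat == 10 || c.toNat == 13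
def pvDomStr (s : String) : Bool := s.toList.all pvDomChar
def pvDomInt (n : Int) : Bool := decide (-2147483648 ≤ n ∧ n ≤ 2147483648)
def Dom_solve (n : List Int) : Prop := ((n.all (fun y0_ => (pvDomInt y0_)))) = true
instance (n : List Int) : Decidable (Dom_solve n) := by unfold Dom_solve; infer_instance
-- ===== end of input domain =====

-- B replaces A's in-place back-and-forth swap walk by one forward pass with an
-- explicit stack (objective: alternative, same cost). Both Pythons mutate n in
-- place to the same final list; the equivalence proved here is about the return value.

-- ===== PORT A =====
-- A's while loop, ported as a fuel recursion; the fuel is an explicit bound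
-- (proved sufficient in the lemmas below), the loop body is a literal transliteration.
def solveLoop : Nat → List Int → Nat → List Int
  | 0, l, _ => l
  | fuel+1, l, i =>
    if i < l.length then
      if 0 < i ∧ l.getD i 0 > l.getD (i-1) 0 + 1 then
        solveLoop fuel ((l.set i (l.getD (i-1) 0)).set (i-1) (l.getD i 0 - 1)) (i-1)
      else
        solveLoop fuel l (i+1)
    else l

def solve (n : List Int) : String :=
  String.join ((solveLoop
    ((n.map (fun x => 2*(x - n.foldl (fun a x => min a x) 0) + 1)).sum.toNat)
    n 1).map PySem.Int.toStr)

-- ===== PORT B =====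
-- Source B's inner while loop: pop stack entries (stack held with top at the head,
-- i.e. Source B's list reversed), decrementing cur, then push cur with the popped
-- entries back on top in reverse pop order.
def bstep : List Int → Int → List Int
  | [], cur => [cur]
  | t :: r, cur => if cur > t + 1 then t :: bstep r (cur - 1) else cur :: t :: r

def solve_alt (n : List Int) : String :=
  String.join (((n.foldl bstep []).reverse).map PySem.Int.toStr)

-- ===== PRECONDITION & SPEC =====
def Spec_solve (n : List Int) (out : String) : Prop := out = solve_alt n
instance (n : List Int) (out : String) : Decidable (Spec_solve n out) := by unfold Spec_solve; infer_instance

-- ===== CLAIM (what is proved, stated in full; the proofs are below) =====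
def Claim_equal_solve : Prop := ∀ (n : List Int), Dom_solve n → Spec_solve n (solve n)

-- ===== LEMMAS AND PROOFS =====

-- stability of the (reversed) stack: every entry exceeds the one below by at most 1
def StR : List Int → Prop
  | [] => True
  | [_] => True
  | x :: y :: r => x ≤ y + 1 ∧ StR (y :: r)

-- the step-count potential: each loop iteration of A decreases it by exactly 1
def boundI (m : Int) (res rest : List Int) : Int :=
  (rest.map (fun x => 2*(x - m) + 1)).sum + (res.map (fun x => 2*(x - m))).sum

lemma StR_tail (x : Int) (r : List Int) (h : StR (x :: r)) : StR r := by
  cases r with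
  | nil => trivial
  | cons y s => exact h.2

lemma StR_head (x : Int) (r : List Int) (h : StR (x :: r)) :
    ∀ u, r.head? = some u → x ≤ u + 1 := by
  intro u hu
  cases r with
  | nil => simp at hu
  | cons y s => simp at hu; subst hu; exact h.1

lemma StR_cons (x y : Int) (r : List Int) (hxy : x ≤ y + 1) (h : StR (y :: r)) :
    StR (x :: y :: r) := ⟨hxy, h⟩

lemma bstep_ne_nil (r : List Int) (c : Int) : bstep r c ≠ [] := by
  induction r generalizing c with
  | nil => simp [bstep]
  | cons t r ih => simp only [bstep]; split_ifs <;> simp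

lemma bstep_head (r : List Int) (c h : Int) (hh : (bstep r c).head? = some h) :
    h = c ∨ r.head? = some h := by
  cases r with
  | nil =>
    simp [bstep] at hh
    exact Or.inl hh.symm
  | cons t s =>
    by_cases hc : c > t + 1
    · simp only [bstep, if_pos hc, List.head?_cons, Option.some.injEq] at hh
      exact Or.inr (by simp [← hh])
    · simp only [bstep, if_neg hc, List.head?_cons, Option.some.injEq] at hh
      exact Or.inl hh.symm

-- a popped element, re-processed against the new stack, never pops again
lemma bstep_nopop (r : List Int) (d t : Int)
    (ht : ∀ u, r.head? = some u → t ≤ u + 1) (htd : t ≤ d) :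
    bstep (bstep r d) t = t :: bstep r d := by
  obtain ⟨h, s, hs⟩ : ∃ h s, bstep r d = h :: s := by
    cases hb : bstep r d with
    | nil => exact absurd hb (bstep_ne_nil r d)
    | cons h s => exact ⟨h, s, rfl⟩
  have hh : h = d ∨ r.head? = some h := bstep_head r d h (by simp [hs])
  have hth : t ≤ h + 1 := by
    rcases hh with rfl | hh
    · omega
    · exact ht h hh
  rw [hs]
  simp only [bstep]
  rw [if_neg (by omega)]

-- list surgery performed by A's simultaneous assignment
lemma set_set_swap (p : List Int) (t d : Int) (s : List Int) :
    ((p ++ t :: d :: s).set (p.length + 1) t).set p.length (d - 1)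
      = p ++ (d - 1) :: t :: s := by
  induction p with
  | nil => simp [List.set]
  | cons a p _ih => simp [List.set]

-- main invariant: A's loop, run from the state "stable prefix res (reversed) ++ rest,
-- index at |res|", computes B's stack fold
lemma main_lemma (fuel : Nat) : ∀ (res rest : List Int) (m : Int),
    StR res →
    (∀ x ∈ res, m ≤ x) → (∀ x ∈ rest, m ≤ x) →
    boundI m res rest ≤ (fuel : Int) →
    solveLoop fuel (res.reverse ++ rest) res.length = (rest.foldl bstep res).reverse := by
  induction fuel with
  | zero =>
    intro res rest m _ hres hrest hb
    have hrest0 : rest = [] := by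
      cases rest with
      | nil => rfl
      | cons d rest' =>
        exfalso
        have h1 : 0 ≤ ((rest'.map (fun x => 2*(x - m) + 1)).sum) := by
          apply List.sum_nonneg; intro x hx
          simp only [List.mem_map] at hx; obtain ⟨y, hy, rfl⟩ := hx
          have := hrest y (by simp [hy]); omega
        have h2 : 0 ≤ ((res.map (fun x => 2*(x - m))).sum) := by
          apply List.sum_nonneg; intro x hx
          simp only [List.mem_map] at hx; obtain ⟨y, hy, rfl⟩ := hx
          have := hres y hy; omega
        have hd := hrest d (by simp)
        simp only [boundI, List.map_cons, List.sum_cons, Nat.cast_zero] at hb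
        omega
    subst hrest0
    simp [solveLoop]
  | succ fuel ih =>
    intro res rest m hchain hres hrest hb
    cases rest with
    | nil =>
      simp only [solveLoop, List.append_nil]
      rw [if_neg (by simp)]
      simp
    | cons d rest' =>
      have hlen : res.length < (res.reverse ++ d :: rest').length := by simp
      have hgetd : (res.reverse ++ d :: rest').getD res.length 0 = d := by
        rw [List.getD_eq_getElem?_getD, List.getElem?_append_right (by simp)]
        simp
      cases res with
      | nil =>
        -- i = 0: the guard's "0 < i" fails, step right
        simp only [solveLoop]
        rw [if_pos hlen, if_neg (by simp)]
        have hmd : m ≤ d := hrest d (by simp)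
        have := ih [d] rest' m trivial
          (by intro x hx
              simp only [List.mem_singleton] at hx
              exact hx ▸ hmd)
          (fun x hx => hrest x (by simp [hx]))
          (by simp only [boundI, List.map_cons, List.sum_cons, List.map_nil, List.sum_nil] at hb ⊢
              push_cast at hb ⊢; omega)
        simp only [List.reverse_nil, List.nil_append, List.length_nil, List.reverse_cons,
          List.singleton_append, List.length_cons, List.foldl_cons] at this ⊢
        rw [show bstep [] d = [d] from rfl]
        exact this
      | cons t res'' =>
        have hgetdm : (((t :: res'').reverse) ++ d :: rest').getD ((t :: res'').length - 1) 0 = t := by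
          have he : (t :: res'').reverse = res''.reverse ++ [t] := by simp
          rw [he, List.getD_eq_getElem?_getD, List.append_assoc]
          rw [List.getElem?_append_right (by simp)]
          simp
        have hlen' : (t :: res'').length - 1 = res''.length := by simp
        by_cases hcmp : d > t + 1
        · -- swap branch: A moves d one place left, decremented; mirror of one pop in B
          simp only [solveLoop]
          rw [if_pos hlen, if_pos ⟨by simp, by rw [hgetd, hgetdm]; exact hcmp⟩]
          rw [hgetd, hgetdm]
          have hsurg : (((((t :: res'').reverse) ++ d :: rest').set (t :: res'').length t).set
              ((t :: res'').length - 1) (d - 1)) = res''.reverse ++ (d - 1) :: t :: rest' := by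
            have h1 : (t :: res'').reverse ++ d :: rest' = res''.reverse ++ t :: d :: rest' := by simp
            have h2 : (t :: res'').length = res''.reverse.length + 1 := by simp
            rw [h1, hlen', h2, show res''.length = res''.reverse.length from by simp]
            exact set_set_swap res''.reverse t d rest'
          rw [hsurg, hlen']
          have hhead : ∀ u, res''.head? = some u → t ≤ u + 1 := StR_head t res'' hchain
          have := ih res'' ((d-1) :: t :: rest') m (StR_tail t res'' hchain)
            (fun x hx => hres x (List.mem_cons_of_mem t hx))
            (by intro x hx
                simp only [List.mem_cons] at hx
                have hmt : m ≤ t := hres t (by simp)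
                rcases hx with rfl | rfl | hx
                · omega
                · exact hmt
                · exact hrest x (by simp [hx]))
            (by simp only [boundI, List.map_cons, List.sum_cons] at hb ⊢
                push_cast at hb ⊢; omega)
          rw [this]
          congr 1
          simp only [List.foldl_cons]
          congr 1
          have hstep : bstep (t :: res'') d = t :: bstep res'' (d - 1) := by
            simp only [bstep]; rw [if_pos hcmp]
          rw [hstep]
          exact bstep_nopop res'' (d-1) t hhead (by omega)
        · -- push branch: A steps right, mirror of B pushing onto the stack
          simp only [solveLoop]
          rw [if_pos hlen, if_neg (by rw [hgetd, hgetdm]; intro hc; exact hcmp hc.2)]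
          have hres2 : (d :: t :: res'').reverse ++ rest' = (t :: res'').reverse ++ d :: rest' := by simp
          have hlen2 : (t :: res'').length + 1 = (d :: t :: res'').length := by simp
          rw [← hres2, hlen2]
          have := ih (d :: t :: res'') rest' m
            (StR_cons d t res'' (by omega) hchain)
            (by intro x hx
                simp only [List.mem_cons] at hx
                rcases hx with h | h | h
                · exact h ▸ hrest d (by simp)
                · exact h ▸ hres t (by simp)
                · exact hres x (by simp [h]))
            (fun x hx => hrest x (by simp [hx]))
            (by simp only [boundI, List.map_cons, List.sum_cons] at hb ⊢
                push_cast at hb; omega)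
          rw [this]
          congr 1
          rw [List.foldl_cons]
          congr 1
          simp only [bstep]; rw [if_neg hcmp]

lemma foldl_min_le (l : List Int) : ∀ (a : Int), (∀ x ∈ l, l.foldl (fun a x => min a x) a ≤ x)
    ∧ l.foldl (fun a x => min a x) a ≤ a := by
  induction l with
  | nil => intro a; simp
  | cons y l ih =>
    intro a
    constructor
    · intro x hx
      simp only [List.mem_cons] at hx
      rcases hx with rfl | hx
      · simp only [List.foldl_cons]
        calc l.foldl (fun a x => min a x) (min a x) ≤ min a x := (ih (min a x)).2
          _ ≤ x := min_le_right _ _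
      · exact (ih (min a y)).1 x hx
    · simp only [List.foldl_cons]
      calc l.foldl (fun a x => min a x) (min a y) ≤ min a y := (ih (min a y)).2
        _ ≤ a := min_le_left _ _

-- ===== VERDICT (by name: the statement is the Claim_ definition above) =====
theorem solve_spec : Claim_equal_solve := by
  intro n _
  unfold Spec_solve solve solve_alt
  cases n with
  | nil => simp [solveLoop]
  | cons d rest =>
    set m : Int := (d :: rest).foldl (fun a x => min a x) 0 with hm
    have hmle : ∀ x ∈ d :: rest, m ≤ x := (foldl_min_le (d :: rest) 0).1
    set S : Int := ((d :: rest).map (fun x => 2*(x - m) + 1)).sum with hS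
    have hmd : m ≤ d := hmle d (by simp)
    have hrest0 : 0 ≤ (rest.map (fun x => 2*(x - m) + 1)).sum := by
      apply List.sum_nonneg; intro x hx
      simp only [List.mem_map] at hx; obtain ⟨y, hy, rfl⟩ := hx
      have := hmle y (by simp [hy]); omega
    have hS1 : (1:Int) ≤ S := by
      rw [hS, List.map_cons, List.sum_cons]; omega
    have hcast : (S.toNat : Int) = S := Int.toNat_of_nonneg (by omega)
    have hkey := main_lemma S.toNat [d] rest m trivial
      (by intro x hx
          simp only [List.mem_singleton] at hx
          exact hx ▸ hmd)
      (fun x hx => hmle x (by simp [hx]))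
      (by simp only [boundI, List.map_cons, List.sum_cons, List.map_nil, List.sum_nil]
          rw [hcast, hS, List.map_cons, List.sum_cons]
          omega)
    simp only [List.reverse_cons, List.reverse_nil, List.nil_append, List.singleton_append,
      List.length_cons, List.length_nil] at hkey
    rw [hkey]
    have hfold : List.foldl bstep [] (d :: rest) = List.foldl bstep [d] rest := by
      simp [List.foldl_cons, bstep]
    rw [hfold]
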